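-- pv_equiv track=rewrite | github.com/Suman9038/DSA | Hashing/UnionOfTwoUnsortedArray.py | unionCount
-- ===== SOURCE A (Python) =====
-- def unionCount(a: list[int],b:list[int]) :
--     m: int= len(a)
--     n: int= len(b)
--     s= set()
--     for i in range(0,m) :
--         s.add(a[i])
--     for j in range(0,n) :
--         s.add(b[j])
--     return len(s)
-- ===== SOURCE B (Python) =====
-- def unionCount(a: list[int], b: list[int]):
--     xs = sorted(a + b)
--     if not xs:
--         return 0
--     cnt = 1
--     prev = xs[0]
--     for x in xs[1:]:
--         if x != prev:
--             cnt += 1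
--         prev = x
--     return cnt
-- ===== Notes on version B (the rewrite author's own statement) =====
-- stated objective: alternative
-- what changed: B concatenates the two lists, sorts the result, and counts distinct values in one linear scan over adjacent pairs, instead of inserting every element into a hash set and taking its size.
import Mathlib
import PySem

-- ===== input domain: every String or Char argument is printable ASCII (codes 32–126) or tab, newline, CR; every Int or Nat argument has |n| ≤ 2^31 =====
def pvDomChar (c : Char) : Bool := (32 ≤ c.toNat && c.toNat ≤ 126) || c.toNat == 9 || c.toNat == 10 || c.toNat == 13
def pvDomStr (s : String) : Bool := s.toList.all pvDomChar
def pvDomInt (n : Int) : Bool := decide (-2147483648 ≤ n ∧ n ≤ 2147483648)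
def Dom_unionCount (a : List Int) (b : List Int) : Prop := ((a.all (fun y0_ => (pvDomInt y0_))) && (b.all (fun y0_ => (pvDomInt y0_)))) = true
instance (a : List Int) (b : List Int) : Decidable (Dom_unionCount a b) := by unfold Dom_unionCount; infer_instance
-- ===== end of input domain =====

-- B sorts the concatenation and counts distinct values in one adjacent-pair scan
-- instead of inserting every element into a set; alternative algorithm, same result.


-- ===== PORT A =====
def unionCount (a : List Int) (b : List Int) : Int :=
  let m : Int := PySem.List.len a
  let n : Int := PySem.List.len b
  let s : PySem.Set Int := PySem.Set.empty
  let s := (PySem.List.pyRange 0 m 1).foldl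
    (fun s i => PySem.Set.add s (PySem.List.pyGetD a i 0)) s
  let s := (PySem.List.pyRange 0 n 1).foldl
    (fun s j => PySem.Set.add s (PySem.List.pyGetD b j 0)) s
  (PySem.Set.len s : Int)

-- ===== PORT B =====
-- the scan over xs[1:] with accumulator (prev, cnt)
def pvCountRuns (prev : Int) (cnt : Int) : List Int → Int
  | [] => cnt
  | x :: rest => pvCountRuns x (if x ≠ prev then cnt + 1 else cnt) rest

def unionCount_alt (a : List Int) (b : List Int) : Int :=
  match PySem.List.sorted (a ++ b) (fun x => x) false with
  | [] => 0
  | x :: rest => pvCountRuns x 1 rest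

-- ===== PRECONDITION & SPEC =====
def Spec_unionCount (a : List Int) (b : List Int) (out : Int) : Prop := out = unionCount_alt a b
instance (a : List Int) (b : List Int) (out : Int) : Decidable (Spec_unionCount a b out) := by unfold Spec_unionCount; infer_instance

-- ===== CLAIM (what is proved, stated in full; the proofs are below) =====
def Claim_equal_unionCount : Prop := ∀ (a : List Int) (b : List Int), Dom_unionCount a b → Spec_unionCount a b (unionCount a b)

-- ===== LEMMAS AND PROOFS =====

lemma pvCountRuns_add (l : List Int) : ∀ prev cnt c,
    pvCountRuns prev (cnt + c) l = pvCountRuns prev cnt l + c := by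
  induction l with
  | nil => intro prev cnt c; rfl
  | cons x rest ih =>
    intro prev cnt c
    simp only [pvCountRuns]
    split_ifs with h
    · rw [show cnt + c + 1 = (cnt + 1) + c by ring, ih, ih]
    · exact ih ..

lemma pvCountRuns_sorted (l : List Int) : ∀ x : Int,
    (x :: l).Pairwise (· ≤ ·) → pvCountRuns x 1 l = ((x :: l).toFinset.card : Int) := by
  induction l with
  | nil => intro x _; simp [pvCountRuns]
  | cons y t ih =>
    intro x hp
    have hxy : x ≤ y := (List.pairwise_cons.1 hp).1 y (by simp)
    have hpt : (y :: t).Pairwise (· ≤ ·) := (List.pairwise_cons.1 hp).2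
    simp only [pvCountRuns]
    by_cases hxy' : y = x
    · subst hxy'
      simp only [ne_eq, not_true_eq_false, if_false]
      rw [ih y hpt]
      congr 2
      simp
    · have hlt : ∀ z ∈ y :: t, x < z := by
        intro z hz
        rcases List.mem_cons.1 hz with rfl | hz
        · exact lt_of_le_of_ne hxy (fun h => hxy' h.symm)
        · have hyz : y ≤ z := (List.pairwise_cons.1 hpt).1 z hz
          exact lt_of_lt_of_le (lt_of_le_of_ne hxy (fun h => hxy' h.symm)) hyz
      have hnm : x ∉ y :: t := fun hm => lt_irrefl x (hlt x hm)
      simp only [ne_eq, hxy', not_false_eq_true, if_true]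
      rw [pvCountRuns_add, ih y hpt]
      have : (x :: y :: t).toFinset = insert x (y :: t).toFinset := by simp
      rw [this, Finset.card_insert_of_notMem (by simpa using hnm)]
      push_cast
      ring

lemma pvOfList_length (xs : List Int) :
    ((PySem.Set.ofList xs).length : Int) = (xs.toFinset.card : Int) := by
  have hnd := PySem.Set.nodup_ofList (xs := xs)
  have hmem : (PySem.Set.ofList xs).toFinset = xs.toFinset := by
    ext z; simp [List.mem_toFinset, PySem.Set.mem_ofList]
  rw [← List.toFinset_card_of_nodup hnd, hmem]

-- ===== VERDICT (by name: the statement is the Claim_ definition above) =====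
theorem unionCount_spec : Claim_equal_unionCount := by
  intro a b _
  unfold Spec_unionCount unionCount unionCount_alt
  simp only []
  rw [PySem.List.foldl_pyRange_zero_pyGetD,
      PySem.List.foldl_pyRange_zero_pyGetD]
  have hA : ((a ++ b).foldl PySem.Set.add (PySem.Set.empty)) = PySem.Set.ofList (a ++ b) := by
    rw [PySem.Set.ofList_eq_foldl]; rfl
  have hfold : (b.foldl PySem.Set.add (a.foldl PySem.Set.add PySem.Set.empty))
      = PySem.Set.ofList (a ++ b) := by
    rw [← hA, List.foldl_append]
  rw [hfold]
  have hperm := PySem.List.sorted_perm (xs := a ++ b) (key := fun x : Int => x) (rev := false)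
  have hfin : (PySem.List.sorted (a ++ b) (fun x => x) false).toFinset = (a ++ b).toFinset := by
    ext z; simp [List.mem_toFinset, hperm.mem_iff]
  have hpw := PySem.List.sorted_pairwise (xs := a ++ b) (key := fun x : Int => x)
  cases hs : PySem.List.sorted (a ++ b) (fun x => x) false with
  | nil =>
    have hnil : a ++ b = [] := by
      have := hperm
      rw [hs] at this
      exact this.symm.eq_nil
    show (PySem.Set.ofList (a ++ b)).len = 0
    rw [hnil]; rfl
  | cons x rest =>
    rw [hs] at hpw hfin
    show (PySem.Set.ofList (a ++ b)).len = pvCountRuns x 1 rest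
    rw [pvCountRuns_sorted rest x hpw, hfin]
    simp [PySem.Set.len, pvOfList_length]
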